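-- pv_equiv track=rewrite | github.com/JoaoDaviMNunes/AES_decrypt | divisor_chaves_weak.py | get_initial_keys
-- ===== SOURCE A (Python) =====
-- import string
--
-- charset = string.ascii_letters + string.digits  # 62 caracteres possíveis
--
-- def get_initial_keys(start_key, num_keys_per_group, num_groups):
--     start_key_suffix = start_key[11:]  # Pegando os 5 caracteres finais da chave
--     start_number = 0
--
--     # Convertendo a chave inicial (SecurityAESaaaaa) para um número base 62
--     for i, char in enumerate(start_key_suffix):
--         start_number = start_number * 62 + charset.index(char)
--
--     initial_keys = []
--     for group in range(num_groups):
--         # Calculando o número da chave inicial para o grupo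
--         key_number = start_number + group * num_keys_per_group
--         new_suffix = []
--         # Convertendo o número de volta para uma chave no formato base62
--         for _ in range(5):
--             new_suffix.insert(0, charset[key_number % 62])
--             key_number //= 62
--         initial_key = start_key[:11] + ''.join(new_suffix)
--         initial_keys.append(initial_key)
--
--     return initial_keys
-- ===== SOURCE B (Python) =====
-- import string
--
-- charset = string.ascii_letters + string.digits  # 62 possible characters
--
-- def get_initial_keys(start_key, num_keys_per_group, num_groups):
--     # Decode the start key's suffix to a number, as a base-62 reading.
--     n = 0
--     for char in start_key[11:]:
--         n = n * 62 + charset.index(char)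
--     # Low 5 base-62 digits, least-significant first: an odometer.
--     digits = []
--     for _ in range(5):
--         digits.append(n % 62)
--         n //= 62
--     prefix = start_key[:11]
--     keys = []
--     for _ in range(num_groups):
--         keys.append(prefix + ''.join(charset[d] for d in reversed(digits)))
--         # advance the odometer by num_keys_per_group, carrying upward;
--         # any carry past the 5th digit is discarded
--         carry = num_keys_per_group
--         for i in range(5):
--             if carry == 0:
--                 break
--             t = digits[i] + carry
--             digits[i] = t % 62
--             carry = t // 62
--     return keys
-- ===== Notes on version B (the rewrite author's own statement) =====
-- stated objective: faster
-- what changed: Instead of recomputing key_number = start + group*step and re-encoding it with five divmods of a possibly huge integer per group, B keeps the five base-62 digits as an incremental odometer: it adds num_keys_per_group to the low digit once per group and propagates carries, discarding overflow past the fifth digit.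
import Mathlib
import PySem

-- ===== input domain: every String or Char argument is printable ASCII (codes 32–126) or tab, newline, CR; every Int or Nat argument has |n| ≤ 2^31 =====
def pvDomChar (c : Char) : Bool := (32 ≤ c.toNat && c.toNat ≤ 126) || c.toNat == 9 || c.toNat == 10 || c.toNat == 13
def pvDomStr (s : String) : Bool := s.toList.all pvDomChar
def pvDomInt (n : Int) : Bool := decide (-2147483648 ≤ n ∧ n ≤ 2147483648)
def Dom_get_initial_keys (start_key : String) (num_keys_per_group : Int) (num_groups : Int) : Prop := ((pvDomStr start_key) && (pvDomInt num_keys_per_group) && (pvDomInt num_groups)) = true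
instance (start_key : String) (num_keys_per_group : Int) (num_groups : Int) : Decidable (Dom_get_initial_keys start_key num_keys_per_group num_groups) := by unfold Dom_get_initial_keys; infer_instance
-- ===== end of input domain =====

-- B replaces A's per-group fresh integer + 5-divmod re-encoding by an incremental base-62
-- odometer (add step to the low digit and propagate carries): same outputs, bounded per-group work.


-- charset = string.ascii_letters + string.digits
def pvCharset : List Char := ['a', 'b', 'c', 'd', 'e', 'f', 'g', 'h', 'i', 'j', 'k', 'l', 'm', 'n', 'o', 'p', 'q', 'r', 's', 't', 'u', 'v', 'w', 'x', 'y', 'z', 'A', 'B', 'C', 'D', 'E', 'F', 'G', 'H', 'I', 'J', 'K', 'L', 'M', 'N', 'O', 'P', 'Q', 'R', 'S', 'T', 'U', 'V', 'W', 'X', 'Y', 'Z', '0', '1', '2', '3', '4', '5', '6', '7', '8', '9']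

-- charset[i] for 0 ≤ i < 62 (both Pythons index charset only with n % 62)
def pvCharAt (i : Int) : Char := (PySem.List.pyGet? pvCharset i).getD ' '

-- ===== PORT A =====
-- the inner `for _ in range(5)` loop: insert charset[n % 62] at position 0, n //= 62
def aSuffixLoop : Nat → Int → List Char → List Char
  | 0, _, acc => acc
  | k + 1, n, acc =>
      aSuffixLoop k (PySem.Int.floordiv n 62) (pvCharAt (PySem.Int.mod n 62) :: acc)

def get_initial_keys (start_key : String) (num_keys_per_group : Int) (num_groups : Int) : List String :=
  let start_key_suffix := PySem.List.slice start_key.toList (some 11) none      -- start_key[11:]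
  -- for i, char in enumerate(...): start_number = start_number*62 + charset.index(char)
  -- charset.index raises ValueError for a char outside charset: Pre_ excludes that; getD 0 is the total form
  let start_number := start_key_suffix.foldl
    (fun (acc : Int) c => acc * 62 + ((PySem.List.index? pvCharset c).getD 0 : Int)) 0
  let pref := PySem.List.slice start_key.toList none (some 11)               -- start_key[:11]
  (PySem.List.pyRange 0 num_groups 1).foldl
    (fun initial_keys group =>
      let key_number := start_number + group * num_keys_per_group
      initial_keys ++ [String.mk (pref ++ aSuffixLoop 5 key_number [])]) []

-- ===== PORT B =====
-- the 5 low base-62 digits of n, least-significant first (B's `digits` seeding loop)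
def bDigits : Nat → Int → List Int
  | 0, _ => []
  | k + 1, n => PySem.Int.mod n 62 :: bDigits k (PySem.Int.floordiv n 62)

-- B's odometer advance: add carry to the low digit, propagate; `break` when carry == 0
def bAdd : List Int → Int → List Int
  | [], _ => []
  | d :: tl, c =>
      if c = 0 then d :: tl
      else PySem.Int.mod (d + c) 62 :: bAdd tl (PySem.Int.floordiv (d + c) 62)

def get_initial_keys_alt (start_key : String) (num_keys_per_group : Int) (num_groups : Int) : List String :=
  let suffix := PySem.List.slice start_key.toList (some 11) none
  let n := suffix.foldl (fun (acc : Int) c => acc * 62 + ((PySem.List.index? pvCharset c).getD 0 : Int)) 0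
  let digits := bDigits 5 n
  let pref := PySem.List.slice start_key.toList none (some 11)
  ((PySem.List.pyRange 0 num_groups 1).foldl
    (fun (st : List Int × List String) _ =>
      (bAdd st.1 num_keys_per_group,
       st.2 ++ [String.mk (pref ++ (st.1.reverse.map pvCharAt))]))
    (digits, [])).2

-- ===== PRECONDITION & SPEC =====
-- Pre_ excludes exactly the inputs where A raises ValueError: a character after position 11
-- that is not in charset (charset.index on it has no match).
def Pre_get_initial_keys (start_key : String) (num_keys_per_group : Int) (num_groups : Int) : Prop :=
  ((start_key.toList.drop 11).all (fun c => pvCharset.contains c)) = true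
instance (start_key : String) (num_keys_per_group : Int) (num_groups : Int) : Decidable (Pre_get_initial_keys start_key num_keys_per_group num_groups) := by unfold Pre_get_initial_keys; infer_instance

def pvWitness_get_initial_keys : String × Int × Int := ("SecurityAESk", 7, 3)

def Spec_get_initial_keys (start_key : String) (num_keys_per_group : Int) (num_groups : Int) (out : List String) : Prop := out = get_initial_keys_alt start_key num_keys_per_group num_groups
instance (start_key : String) (num_keys_per_group : Int) (num_groups : Int) (out : List String) : Decidable (Spec_get_initial_keys start_key num_keys_per_group num_groups out) := by unfold Spec_get_initial_keys; infer_instance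

-- ===== CLAIM (what is proved, stated in full; the proofs are below) =====
def Claim_equal_get_initial_keys : Prop := ∀ (start_key : String) (num_keys_per_group : Int) (num_groups : Int), Dom_get_initial_keys start_key num_keys_per_group num_groups → Pre_get_initial_keys start_key num_keys_per_group num_groups → Spec_get_initial_keys start_key num_keys_per_group num_groups (get_initial_keys start_key num_keys_per_group num_groups)

-- ===== LEMMAS AND PROOFS =====

-- (x % (62*M)) % 62 = x % 62
lemma emod_base (x M : Int) : x % (62 * M) % 62 = x % 62 :=
  Int.emod_emod_of_dvd x ⟨M, rfl⟩

-- (x % (62*M)) / 62 = (x / 62) % M   for M > 0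
lemma ediv_emod (x M : Int) (hM : 0 < M) : x % (62 * M) / 62 = x / 62 % M := by
  have hb : (0:Int) < 62 * M := by positivity
  have hx : x = x % (62 * M) + (M * (x / (62 * M))) * 62 := by
    have := Int.emod_add_ediv x (62 * M); ring_nf; ring_nf at this; omega
  have h1 : x / 62 = x % (62 * M) / 62 + M * (x / (62 * M)) := by
    conv_lhs => rw [hx]
    rw [Int.add_mul_ediv_right _ _ (by norm_num : (62:Int) ≠ 0)]
  have h0 : 0 ≤ x % (62 * M) := Int.emod_nonneg x (by omega)
  have hlt : x % (62 * M) < 62 * M := Int.emod_lt_of_pos x hb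
  have hq0 : 0 ≤ x % (62 * M) / 62 := Int.ediv_nonneg h0 (by norm_num)
  have hqlt : x % (62 * M) / 62 < M := by
    rw [Int.ediv_lt_iff_lt_mul (by norm_num : (0:Int) < 62)]
    omega
  rw [h1, Int.add_mul_emod_self_left, Int.emod_eq_of_lt hq0 hqlt]

-- bDigits only sees n modulo 62^k
lemma bDigits_emod : ∀ (k : Nat) (n : Int), bDigits k (n % (62 ^ k)) = bDigits k n := by
  intro k
  induction k with
  | zero => intro n; simp [bDigits]
  | succ k ih =>
      intro n
      have hpow : (0:Int) < 62 ^ k := by positivity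
      simp only [bDigits, pow_succ, mul_comm ((62:Int) ^ k) 62,
        PySem.Int.mod_eq_emod_of_pos (by norm_num : (0:Int) < 62),
        PySem.Int.floordiv_eq_ediv_of_pos (by norm_num : (0:Int) < 62)]
      rw [emod_base, ediv_emod n _ hpow, ih]

-- the odometer advance computes the truncated sum's digits
lemma bAdd_bDigits : ∀ (k : Nat) (n c : Int), bAdd (bDigits k n) c = bDigits k ((n + c) % (62 ^ k)) := by
  intro k
  induction k with
  | zero => intro n c; simp [bDigits, bAdd]
  | succ k ih =>
      intro n c
      have hpow : (0:Int) < 62 ^ k := by positivity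
      by_cases hc : c = 0
      · subst hc
        simp only [bDigits, bAdd, add_zero]
        have := bDigits_emod (k + 1) n
        simp only [bDigits] at this
        exact this.symm
      · simp only [bDigits, bAdd, if_neg hc,
          PySem.Int.mod_eq_emod_of_pos (by norm_num : (0:Int) < 62),
          PySem.Int.floordiv_eq_ediv_of_pos (by norm_num : (0:Int) < 62), ih]
        have hsplit : n % 62 + 62 * (n / 62) = n := Int.emod_add_ediv n 62
        congr 1
        · -- heads: (n%62 + c) % 62 = (n+c) % (62*62^k) % 62
          rw [show (62:Int) ^ (k+1) = 62 * 62 ^ k by ring, emod_base]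
          conv_rhs => rw [show n + c = n % 62 + c + (n / 62) * 62 by omega]
          rw [Int.add_mul_emod_self_right]
        · -- tails
          congr 1
          rw [show (62:Int) ^ (k+1) = 62 * 62 ^ k by ring, ediv_emod _ _ hpow]
          congr 1
          conv_rhs => rw [show n + c = n % 62 + c + (n / 62) * 62 by omega]
          rw [Int.add_mul_ediv_right _ _ (by norm_num : (62:Int) ≠ 0)]
          ring

-- main loop correspondence: B's stateful odometer fold produces A's per-group keys
lemma main_fold (nk n0 : Int) (pre : List Char) :
    ∀ (m : Nat) (a b : Int), (b - a).toNat = m → ∀ (acc : List String),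
    ((PySem.List.pyRange a b 1).foldl
      (fun (st : List Int × List String) _ =>
        (bAdd st.1 nk, st.2 ++ [String.mk (pre ++ (st.1.reverse.map pvCharAt))]))
      (bDigits 5 (n0 + a * nk), acc)).2
    = (PySem.List.pyRange a b 1).foldl
        (fun ks g => ks ++ [String.mk (pre ++ aSuffixLoop 5 (n0 + g * nk) [])]) acc := by
  intro m
  induction m with
  | zero =>
      intro a b hm acc
      rw [PySem.List.pyRange_one_eq_nil (by omega)]
      simp
  | succ m ih =>
      intro a b hm acc
      have hab : a < b := by omega
      rw [PySem.List.pyRange_one_cons hab]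
      simp only [List.foldl_cons]
      have hdig : bAdd (bDigits 5 (n0 + a * nk)) nk = bDigits 5 (n0 + (a + 1) * nk) := by
        rw [bAdd_bDigits, bDigits_emod]
        ring_nf
      rw [hdig, ih (a + 1) b (by omega)]
      congr 2

-- ===== VERDICT (by name: the statement is the Claim_ definition above) =====
theorem get_initial_keys_spec : Claim_equal_get_initial_keys := by
  intro start_key nk ng _ _
  unfold Spec_get_initial_keys get_initial_keys get_initial_keys_alt
  have := (main_fold nk
    ((PySem.List.slice start_key.toList (some 11) none).foldl
      (fun (acc : Int) c => acc * 62 + ((PySem.List.index? pvCharset c).getD 0 : Int)) 0)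
    (PySem.List.slice start_key.toList none (some 11))
    (ng - 0).toNat 0 ng rfl []).symm
  simpa only [zero_mul, add_zero] using this
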